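-- pv_equiv track=rewrite | github.com/makerjy/sso_final_prj | query-visualization/src/agent/chart_rule_engine.py | _find_elapsed_column
-- ===== SOURCE A (Python) =====
-- from typing import Any, Dict, List, Optional
--
-- def _find_elapsed_column(cols: List[str], context: str) -> Optional[str]:
--     lower = [c.lower() for c in cols]
--     if context == "icu":
--         candidates = [
--             "elapsed_icu_days",
--             "icu_elapsed_days",
--             "days_since_intime",
--             "hours_since_intime",
--             "icu_day",
--         ]
--     else:
--         candidates = [
--             "elapsed_admit_days",
--             "admit_elapsed_days",
--             "days_since_admittime",
--             "hours_since_admittime",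
--             "admit_day",
--         ]
--     for cand in candidates:
--         if cand in lower:
--             return cols[lower.index(cand)]
--     return None
-- ===== SOURCE B (Python) =====
-- def _find_elapsed_column(cols, context):
--     if context == "icu":
--         candidates = [
--             "elapsed_icu_days",
--             "icu_elapsed_days",
--             "days_since_intime",
--             "hours_since_intime",
--             "icu_day",
--         ]
--     else:
--         candidates = [
--             "elapsed_admit_days",
--             "admit_elapsed_days",
--             "days_since_admittime",
--             "hours_since_admittime",
--             "admit_day",
--         ]
--     rank = {name: i for i, name in enumerate(candidates)}
--     best = None  # (rank, column)
--     for c in cols: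
--         r = rank.get(c.lower())
--         if r is not None and (best is None or r < best[0]):
--             best = (r, c)
--     return None if best is None else best[1]
-- ===== Notes on version B (the rewrite author's own statement) =====
-- stated objective: alternative
-- what changed: Replaces A's per-candidate scans of the lowered column list (membership test plus .index per candidate) with a rank dict built once from the candidates and a single min-rank pass over cols (first column wins ties).
import Mathlib
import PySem

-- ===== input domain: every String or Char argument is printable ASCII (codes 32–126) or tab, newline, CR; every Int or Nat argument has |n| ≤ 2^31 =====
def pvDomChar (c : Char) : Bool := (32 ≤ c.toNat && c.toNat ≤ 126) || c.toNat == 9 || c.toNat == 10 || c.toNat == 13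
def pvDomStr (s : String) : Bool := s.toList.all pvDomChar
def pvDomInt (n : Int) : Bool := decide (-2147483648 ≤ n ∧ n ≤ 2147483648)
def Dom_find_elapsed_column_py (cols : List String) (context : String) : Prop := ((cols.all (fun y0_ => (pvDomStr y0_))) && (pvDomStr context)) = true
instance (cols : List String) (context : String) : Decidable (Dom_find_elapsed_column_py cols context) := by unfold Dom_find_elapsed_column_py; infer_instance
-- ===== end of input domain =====

-- B replaces A's per-candidate scans of the lowered column list by a rank table built once
-- and a single min-rank pass over cols (objective: alternative single-pass decomposition).

-- ===== PORT A =====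
-- the candidate list both Pythons select from the context (identical literals in A and B)
def pyCandidates (context : String) : List String :=
  if context == "icu" then
    ["elapsed_icu_days", "icu_elapsed_days", "days_since_intime",
     "hours_since_intime", "icu_day"]
  else
    ["elapsed_admit_days", "admit_elapsed_days", "days_since_admittime",
     "hours_since_admittime", "admit_day"]

-- A's 'for cand in candidates' loop: membership test then cols[lower.index(cand)]
def aScan (cols : List String) (lower : List String) : List String → Option String
  | [] => none
  | cand :: rest =>
    if lower.contains cand then
      match PySem.List.index? lower cand with
      | some i => PySem.List.pyGet? cols (i : Int)
      | none => none
    else aScan cols lower rest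

def find_elapsed_column_py (cols : List String) (context : String) : Option String :=
  let lower := cols.map PySem.Str.lower
  aScan cols lower (pyCandidates context)

-- ===== PORT B =====
def find_elapsed_column_py_alt (cols : List String) (context : String) : Option String :=
  let candidates := pyCandidates context
  let rank : PySem.Dict String Int :=
    (PySem.List.enumerate candidates 0).foldl (fun d p => d.insert p.2 p.1) PySem.Dict.empty
  let best : Option (Int × String) :=
    cols.foldl (fun best c =>
      match PySem.Dict.get? rank (PySem.Str.lower c) with
      | none => best
      | some r =>
        match best with
        | none => some (r, c)
        | some rb => if r < rb.1 then some (r, c) else best) none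
  best.map (·.2)

-- ===== PRECONDITION & SPEC =====
def Spec_find_elapsed_column_py (cols : List String) (context : String) (out : Option String) : Prop := out = find_elapsed_column_py_alt cols context
instance (cols : List String) (context : String) (out : Option String) : Decidable (Spec_find_elapsed_column_py cols context out) := by unfold Spec_find_elapsed_column_py; infer_instance

-- ===== CLAIM (what is proved, stated in full; the proofs are below) =====
def Claim_equal_find_elapsed_column_py : Prop := ∀ (cols : List String) (context : String), Dom_find_elapsed_column_py cols context → Spec_find_elapsed_column_py cols context (find_elapsed_column_py cols context)

-- ===== LEMMAS AND PROOFS =====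

-- first column of cols whose lowercase form equals cand
def fcm (cand : String) : List String → Option String
  | [] => none
  | c :: cs => if PySem.Str.lower c == cand then some c else fcm cand cs

-- index (from k) of the first occurrence of s in a list
def idxFrom (s : String) : Int → List String → Option Int
  | _, [] => none
  | k, c :: cs => if c == s then some k else idxFrom s (k + 1) cs

-- the winner and its rank: first candidate (ranked from k) matched somewhere in cols,
-- paired with the first matching column
def Fwin (cols : List String) : Int → List String → Option (Int × String)
  | _, [] => none
  | k, cand :: rest =>
    match fcm cand cols with
    | some b => some (k, b)
    | none => Fwin cols (k + 1) rest

lemma fcm_eq_none_iff (cand : String) (cols : List String) :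
    fcm cand cols = none ↔ cand ∉ cols.map PySem.Str.lower := by
  induction cols with
  | nil => simp [fcm]
  | cons c cs ih =>
    by_cases h : PySem.Str.lower c = cand
    · simp [fcm, h]
    · have h' : (PySem.Str.lower c == cand) = false := by simpa using h
      simp only [fcm, h', Bool.false_eq_true, if_false, ih, List.map_cons, List.mem_cons]
      have h2 : ¬ cand = PySem.Str.lower c := fun e => h e.symm
      tauto

lemma fcm_bridge (cand : String) : ∀ cols : List String,
    (if (cols.map PySem.Str.lower).contains cand then
      match PySem.List.index? (cols.map PySem.Str.lower) cand with
      | some i => PySem.List.pyGet? cols (i : Int)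
      | none => none
    else none) = fcm cand cols := by
  intro cols
  induction cols with
  | nil => simp [fcm]
  | cons c cs ih =>
    rw [show (c :: cs).map PySem.Str.lower = PySem.Str.lower c :: cs.map PySem.Str.lower from rfl]
    by_cases h : PySem.Str.lower c = cand
    · rw [h, PySem.List.index?_cons_self]
      have : (cand :: cs.map PySem.Str.lower).contains cand = true := by simp
      rw [if_pos this]
      simp only [fcm, h]
      simp
    · rw [PySem.List.index?_cons_of_ne _ h]
      have hb : (PySem.Str.lower c == cand) = false := by simp [h]
      have hb2 : (cand == PySem.Str.lower c) = false := by
        simp only [beq_eq_false_iff_ne, ne_eq]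
        exact fun e => h e.symm
      simp only [fcm, hb, Bool.false_eq_true, if_false, List.contains_cons, hb2, Bool.false_or]
      rw [← ih]
      by_cases hm : (cs.map PySem.Str.lower).contains cand
      · rw [if_pos hm, if_pos hm]
        cases hi : PySem.List.index? (cs.map PySem.Str.lower) cand with
        | none =>
          exact absurd ((PySem.List.index?_eq_none_iff _ _).mp hi) (by simpa using hm)
        | some i =>
          simp only [Option.map_some]
          show PySem.List.pyGet? (c :: cs) ((i + 1 : Nat) : Int) = PySem.List.pyGet? cs (i : Int)
          rw [show ((i + 1 : Nat) : Int) = (i : Int) + 1 by push_cast; ring,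
            PySem.List.pyGet?_cons_succ]
      · rw [if_neg hm, if_neg hm]

lemma aScan_eq (cols : List String) : ∀ (cands : List String) (k : Int),
    aScan cols (cols.map PySem.Str.lower) cands = (Fwin cols k cands).map (·.2) := by
  intro cands
  induction cands with
  | nil => intro k; simp [aScan, Fwin]
  | cons cand rest ih =>
    intro k
    by_cases hc : (cols.map PySem.Str.lower).contains cand
    · have hb := fcm_bridge cand cols
      rw [if_pos hc] at hb
      rw [aScan, if_pos hc, Fwin, hb]
      cases hf : fcm cand cols with
      | some b => rfl
      | none =>
        exact absurd (fcm_eq_none_iff cand cols |>.mp hf) (by simpa using hc)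
    · have hf : fcm cand cols = none :=
        (fcm_eq_none_iff cand cols).mpr (by simpa using hc)
      rw [aScan, if_neg hc, Fwin, hf]
      exact ih (k + 1)

lemma idxFrom_ge (s : String) : ∀ (cands : List String) (k r : Int),
    idxFrom s k cands = some r → k ≤ r := by
  intro cands
  induction cands with
  | nil => intro k r h; simp [idxFrom] at h
  | cons c cs ih =>
    intro k r h
    rw [idxFrom] at h
    by_cases hc : (c == s) = true
    · rw [if_pos hc] at h
      injection h with h'
      omega
    · rw [if_neg hc] at h
      have := ih (k + 1) r h
      omega

lemma Fwin_ge (cols : List String) : ∀ (cands : List String) (k : Int) (p : Int × String),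
    Fwin cols k cands = some p → k ≤ p.1 := by
  intro cands
  induction cands with
  | nil => intro k p h; simp [Fwin] at h
  | cons cand rest ih =>
    intro k p h
    rw [Fwin] at h
    cases hf : fcm cand cols with
    | some b =>
      rw [hf] at h
      injection h with h'
      rw [← h']
    | none =>
      rw [hf] at h
      have := ih (k + 1) p h
      omega

lemma fcm_append (cand c : String) : ∀ cols : List String,
    fcm cand (cols ++ [c]) =
      (fcm cand cols).or (if PySem.Str.lower c == cand then some c else none) := by
  intro cols
  induction cols with
  | nil => simp [fcm]
  | cons x xs ih =>
    by_cases h : PySem.Str.lower x == cand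
    · simp [fcm, h]
    · simp only [List.cons_append, fcm, h, Bool.false_eq_true, if_false]
      exact ih

-- B's loop body, abstracted over the looked-up rank
def stepW (rc : Option Int) (acc : Option (Int × String)) (c : String) : Option (Int × String) :=
  match rc with
  | none => acc
  | some r =>
    match acc with
    | none => some (r, c)
    | some rb => if r < rb.1 then some (r, c) else acc

lemma Fwin_append (cols : List String) (c : String) : ∀ (cands : List String) (k : Int),
    Fwin (cols ++ [c]) k cands =
      stepW (idxFrom (PySem.Str.lower c) k cands) (Fwin cols k cands) c := by
  intro cands
  induction cands with
  | nil => intro k; simp [Fwin, idxFrom, stepW]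
  | cons cand rest ih =>
    intro k
    by_cases hc : (cand == PySem.Str.lower c) = true
    · have he : cand = PySem.Str.lower c := by simpa using hc
      subst he
      rw [Fwin, Fwin, idxFrom, if_pos (by simp), fcm_append,
        show (if (PySem.Str.lower c == PySem.Str.lower c) = true then some c else none)
          = some c by simp]
      cases hf : fcm (PySem.Str.lower c) cols with
      | some b => simp [stepW]
      | none =>
        cases hF : Fwin cols (k + 1) rest with
        | none => simp [stepW]
        | some p =>
          have hk := Fwin_ge cols rest (k + 1) p hF
          show some (k, c) = if k < p.1 then some (k, c) else some p
          rw [if_pos (by omega)]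
    · have he : PySem.Str.lower c ≠ cand := fun e => by simp [e] at hc
      rw [Fwin, Fwin, idxFrom, if_neg (by simpa using hc), fcm_append,
        show (if (PySem.Str.lower c == cand) = true then some c else none)
          = none by simp [he], Option.or_none]
      cases hf : fcm cand cols with
      | some b =>
        cases hi : idxFrom (PySem.Str.lower c) (k + 1) rest with
        | none => simp [stepW]
        | some r =>
          have hr := idxFrom_ge (PySem.Str.lower c) rest (k + 1) r hi
          show some (k, b) = if r < k then some (r, c) else some (k, b)
          rw [if_neg (by omega)]
      | none =>
        exact ih (k + 1)

-- the rank dict B builds is exactly first-occurrence indexing of the candidate list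
lemma rank_get (context s : String) :
    PySem.Dict.get?
      ((PySem.List.enumerate (pyCandidates context) 0).foldl
        (fun d p => d.insert p.2 p.1) PySem.Dict.empty) s
      = idxFrom s 0 (pyCandidates context) := by
  by_cases h : (context == "icu") = true
  · rw [show pyCandidates context =
        ["elapsed_icu_days", "icu_elapsed_days", "days_since_intime",
         "hours_since_intime", "icu_day"] by simp [pyCandidates, h],
      show ((PySem.List.enumerate
          ["elapsed_icu_days", "icu_elapsed_days", "days_since_intime",
           "hours_since_intime", "icu_day"] 0).foldl
          (fun d p => d.insert p.2 p.1) PySem.Dict.empty : PySem.Dict String Int)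
        = PySem.Dict.mk [("elapsed_icu_days", 0), ("icu_elapsed_days", 1),
            ("days_since_intime", 2), ("hours_since_intime", 3), ("icu_day", 4)] from rfl]
    simp only [PySem.Dict.get?_mk_cons, idxFrom]
    rfl
  · rw [show pyCandidates context =
        ["elapsed_admit_days", "admit_elapsed_days", "days_since_admittime",
         "hours_since_admittime", "admit_day"] by simp [pyCandidates, h],
      show ((PySem.List.enumerate
          ["elapsed_admit_days", "admit_elapsed_days", "days_since_admittime",
           "hours_since_admittime", "admit_day"] 0).foldl
          (fun d p => d.insert p.2 p.1) PySem.Dict.empty : PySem.Dict String Int)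
        = PySem.Dict.mk [("elapsed_admit_days", 0), ("admit_elapsed_days", 1),
            ("days_since_admittime", 2), ("hours_since_admittime", 3), ("admit_day", 4)] from rfl]
    simp only [PySem.Dict.get?_mk_cons, idxFrom]
    rfl

lemma Fwin_nil (cands : List String) (k : Int) : Fwin [] k cands = none := by
  induction cands generalizing k with
  | nil => rfl
  | cons cand rest ih => rw [Fwin]; exact ih (k + 1)

lemma foldl_eq_Fwin (context : String) : ∀ cols : List String,
    cols.foldl (fun best c =>
      match PySem.Dict.get?
          ((PySem.List.enumerate (pyCandidates context) 0).foldl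
            (fun d p => d.insert p.2 p.1) PySem.Dict.empty) (PySem.Str.lower c) with
      | none => best
      | some r =>
        match best with
        | none => some (r, c)
        | some rb => if r < rb.1 then some (r, c) else best) none
      = Fwin cols 0 (pyCandidates context) := by
  intro cols
  induction cols using List.reverseRecOn with
  | nil => rw [List.foldl_nil, Fwin_nil]
  | append_singleton xs c ih =>
    rw [List.foldl_append, List.foldl_cons, List.foldl_nil, ih,
      Fwin_append xs c (pyCandidates context) 0, rank_get context (PySem.Str.lower c)]
    cases (idxFrom (PySem.Str.lower c) 0 (pyCandidates context)) with
    | none => rfl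
    | some r => cases (Fwin xs 0 (pyCandidates context)) <;> rfl

-- ===== VERDICT (by name: the statement is the Claim_ definition above) =====
theorem find_elapsed_column_py_spec : Claim_equal_find_elapsed_column_py := by
  intro cols context _
  unfold Spec_find_elapsed_column_py find_elapsed_column_py find_elapsed_column_py_alt
  rw [aScan_eq cols (pyCandidates context) 0]
  dsimp only
  rw [foldl_eq_Fwin context cols]
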